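-- pv_equiv track=rewrite | github.com/tonzmy/FYP | main.py | countNum
-- ===== SOURCE A (Python) =====
-- def countNum(bus, car, motorbike, truck, results):
--     totalNum = len(results)
--     if totalNum < 12:
--         level = 'Light'
--     elif totalNum < 24:
--         level = 'Moderate'
--     else:
--         level ='Heavy'
--
--     for i in range(len(results)):
--         name = results[i]['label']
--         if name == 'bus':
--             bus = bus + 1
--         elif name == 'motorbike':
--             motorbike = motorbike + 1
--         elif name == 'truck':
--             truck = truck + 1
--         elif name == 'car':
--             car = car + 1
--         else:
--             continue
--     return bus, car, motorbike, truck, level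
-- ===== SOURCE B (Python) =====
-- def countNum(bus, car, motorbike, truck, results):
--     labels = [r['label'] for r in results]
--     level = ('Light', 'Moderate', 'Heavy')[(len(results) >= 12) + (len(results) >= 24)]
--     return (bus + labels.count('bus'), car + labels.count('car'),
--             motorbike + labels.count('motorbike'), truck + labels.count('truck'), level)
-- ===== Notes on version B (the rewrite author's own statement) =====
-- stated objective: idiomatic
-- what changed: A's single indexed loop with per-element if/elif accumulator updates is replaced by staged passes: extract the label list once, then answer each of the four counts with an independent list.count pass, and pick the level by arithmetic on booleans indexing a table instead of the if/elif chain.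
-- outside the precondition, e.g. on countNum(0, 0, 0, 0, [{}]): A raises KeyError, B raises KeyError
import Mathlib
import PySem

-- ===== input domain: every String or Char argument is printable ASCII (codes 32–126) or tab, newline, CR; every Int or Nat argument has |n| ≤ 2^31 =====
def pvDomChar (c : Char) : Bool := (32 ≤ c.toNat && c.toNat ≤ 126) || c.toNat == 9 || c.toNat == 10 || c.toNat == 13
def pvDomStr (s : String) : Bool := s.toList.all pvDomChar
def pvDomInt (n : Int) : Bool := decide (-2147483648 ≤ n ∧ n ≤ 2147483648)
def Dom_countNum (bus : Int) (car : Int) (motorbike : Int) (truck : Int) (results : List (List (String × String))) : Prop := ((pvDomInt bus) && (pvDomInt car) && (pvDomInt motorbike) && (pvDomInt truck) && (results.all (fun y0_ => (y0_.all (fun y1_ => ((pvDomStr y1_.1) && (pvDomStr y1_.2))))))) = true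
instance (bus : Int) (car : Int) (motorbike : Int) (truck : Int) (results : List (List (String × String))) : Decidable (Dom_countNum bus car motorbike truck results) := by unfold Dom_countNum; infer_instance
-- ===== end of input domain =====

-- B replaces A's single indexed if/elif loop by staged passes: a label list, four independent
-- list.count passes, and a table-indexed level (idiomatic, same cost).

-- ===== PORT A =====
-- loop body of A's for-loop, one step of the if/elif dispatch
def countStep (st : Int × Int × Int × Int) (r : List (String × String)) : Int × Int × Int × Int :=
  let name := (PySem.Dict.mk r).getD "label" ""
  if name == "bus" then (st.1 + 1, st.2.1, st.2.2.1, st.2.2.2)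
  else if name == "motorbike" then (st.1, st.2.1, st.2.2.1 + 1, st.2.2.2)
  else if name == "truck" then (st.1, st.2.1, st.2.2.1, st.2.2.2 + 1)
  else if name == "car" then (st.1, st.2.1 + 1, st.2.2.1, st.2.2.2)
  else st

def countNum (bus : Int) (car : Int) (motorbike : Int) (truck : Int) (results : List (List (String × String))) : Int × Int × Int × Int × String :=
  let totalNum : Int := PySem.List.len results
  let level : String := if totalNum < 12 then "Light" else if totalNum < 24 then "Moderate" else "Heavy"
  let st := (PySem.List.pyRange 0 (PySem.List.len results) 1).foldl
    (fun st i => countStep st (PySem.List.pyGetD results i []))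
    (bus, car, motorbike, truck)
  (st.1, st.2.1, st.2.2.1, st.2.2.2, level)

-- ===== PORT B =====
def countNum_alt (bus : Int) (car : Int) (motorbike : Int) (truck : Int) (results : List (List (String × String))) : Int × Int × Int × Int × String :=
  let labels := results.map (fun r => (PySem.Dict.mk r).getD "label" "")
  let idx : Int := (if (12 : Int) ≤ PySem.List.len results then 1 else 0)
                 + (if (24 : Int) ≤ PySem.List.len results then 1 else 0)
  let level := PySem.List.pyGetD ["Light", "Moderate", "Heavy"] idx ""
  (bus + PySem.List.count labels "bus", car + PySem.List.count labels "car",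
   motorbike + PySem.List.count labels "motorbike", truck + PySem.List.count labels "truck", level)

-- ===== PRECONDITION & SPEC =====
-- Pre_ excludes results containing a dict without a 'label' key, on which Python A (and B) raise KeyError.
def Pre_countNum (bus : Int) (car : Int) (motorbike : Int) (truck : Int) (results : List (List (String × String))) : Prop :=
  ∀ r ∈ results, "label" ∈ r.map Prod.fst
instance (bus : Int) (car : Int) (motorbike : Int) (truck : Int) (results : List (List (String × String))) : Decidable (Pre_countNum bus car motorbike truck results) := by unfold Pre_countNum; infer_instance

def pvWitness_countNum : Int × Int × Int × Int × (List (List (String × String))) :=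
  (1, 2, 0, 3, [[("label", "car")], [("label", "dog"), ("x", "y")], [("label", "bus")]])

def Spec_countNum (bus : Int) (car : Int) (motorbike : Int) (truck : Int) (results : List (List (String × String))) (out : Int × Int × Int × Int × String) : Prop := out = countNum_alt bus car motorbike truck results
instance (bus : Int) (car : Int) (motorbike : Int) (truck : Int) (results : List (List (String × String))) (out : Int × Int × Int × Int × String) : Decidable (Spec_countNum bus car motorbike truck results out) := by unfold Spec_countNum; infer_instance

-- ===== CLAIM (what is proved, stated in full; the proofs are below) =====
def Claim_equal_countNum : Prop := ∀ (bus : Int) (car : Int) (motorbike : Int) (truck : Int) (results : List (List (String × String))), Dom_countNum bus car motorbike truck results → Pre_countNum bus car motorbike truck results → Spec_countNum bus car motorbike truck results (countNum bus car motorbike truck results)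

-- ===== LEMMAS AND PROOFS =====

-- A's loop over the labels adds, to each accumulator, the number of occurrences of its label.
theorem countNum_loop_eq (l : List (List (String × String))) (b c m t : Int) :
    l.foldl countStep (b, c, m, t)
    = (b + (l.map (fun r => (PySem.Dict.mk r).getD "label" "")).count "bus",
       c + (l.map (fun r => (PySem.Dict.mk r).getD "label" "")).count "car",
       m + (l.map (fun r => (PySem.Dict.mk r).getD "label" "")).count "motorbike",
       t + (l.map (fun r => (PySem.Dict.mk r).getD "label" "")).count "truck") := by
  induction l generalizing b c m t with
  | nil => simp
  | cons r rs ih =>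
    simp only [List.foldl_cons, List.map_cons, List.count_cons, countStep]
    by_cases hb : (PySem.Dict.mk r).getD "label" "" = "bus" <;>
    by_cases hm : (PySem.Dict.mk r).getD "label" "" = "motorbike" <;>
    by_cases ht : (PySem.Dict.mk r).getD "label" "" = "truck" <;>
    by_cases hc : (PySem.Dict.mk r).getD "label" "" = "car" <;>
      simp_all [beq_iff_eq] <;> omega

-- A's if/elif level chain equals B's boolean-arithmetic table lookup.
theorem countNum_level_eq (n : Int) :
    (if n < 12 then "Light" else if n < 24 then "Moderate" else "Heavy")
    = PySem.List.pyGetD ["Light", "Moderate", "Heavy"]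
        ((if (12 : Int) ≤ n then 1 else 0) + (if (24 : Int) ≤ n then 1 else 0)) "" := by
  split_ifs <;> simp_all [PySem.List.pyGetD, PySem.List.pyGet?, PySem.List.pyIdx?] <;> omega

-- ===== VERDICT (by name: the statement is the Claim_ definition above) =====
theorem countNum_spec : Claim_equal_countNum := by
  intro bus car motorbike truck results _ _
  show countNum bus car motorbike truck results = countNum_alt bus car motorbike truck results
  unfold countNum countNum_alt
  rw [PySem.List.foldl_pyRange_pyGetD results [] _ _ (by norm_num)]
  simp only [Int.toNat_zero, List.drop_zero, countNum_loop_eq, PySem.List.count_eq,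
    countNum_level_eq]
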